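-- pv_equiv track=rewrite | github.com/Saobby/zhangguojun | api/server.py | is_fail
-- ===== SOURCE A (Python) =====
-- def is_fail(i):
--     j = {}
--     for a in i:
--         if a in j:
--             j[a] += 1
--         else:
--             j[a] = 1
--     for k, v in j.items():
--         if v != 2:
--             return False
--     return True
-- ===== SOURCE B (Python) =====
-- def is_fail(i):
--     seen_once = set()
--     seen_twice = set()
--     for a in i:
--         if a in seen_twice:
--             return False
--         elif a in seen_once:
--             seen_once.remove(a)
--             seen_twice.add(a)
--         else:
--             seen_once.add(a)
--     return len(seen_once) == 0
-- ===== Notes on version B (the rewrite author's own statement) =====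
-- stated objective: faster
-- what changed: Replaces the two-pass count-dict-then-check with a single pass maintaining two sets (seen once / seen twice) that returns False as soon as any element is seen a third time, finally checking that no element was seen exactly once.
import Mathlib
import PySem

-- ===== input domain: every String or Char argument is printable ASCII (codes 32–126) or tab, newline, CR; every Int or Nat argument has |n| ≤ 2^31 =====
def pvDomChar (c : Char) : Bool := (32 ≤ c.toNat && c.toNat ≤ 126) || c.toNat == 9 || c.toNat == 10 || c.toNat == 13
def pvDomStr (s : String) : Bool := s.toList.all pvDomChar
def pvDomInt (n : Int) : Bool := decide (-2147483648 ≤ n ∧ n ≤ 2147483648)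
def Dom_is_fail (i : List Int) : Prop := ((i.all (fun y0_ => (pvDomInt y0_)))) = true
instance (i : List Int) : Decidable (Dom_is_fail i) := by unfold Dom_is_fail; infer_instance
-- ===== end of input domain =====

-- B replaces A's count-dict-then-check two passes by one pass over the list with two sets
-- (seen once / seen twice) and an early exit; same O(n) cost, different decomposition.


-- ===== PORT A =====
-- the second loop of A, with its early 'return False'
def isFailCheck : List (Int × Int) → Bool
  | [] => true
  | (_, v) :: rest => if v ≠ 2 then false else isFailCheck rest

def is_fail (i : List Int) : Bool :=
  let j := i.foldl
    (fun d a => if d.contains a then d.modify a 0 (· + 1) else d.insert a (1 : Int))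
    PySem.Dict.empty
  isFailCheck j.items

-- ===== PORT B =====
-- the single loop of B over the remaining list, carrying the two sets
-- (Python's seen_once.remove(a) is guarded by 'a in seen_once', so it never raises: discard is exact here)
def isFailGo : List Int → PySem.Set Int → PySem.Set Int → Bool
  | [], once, _ => PySem.Set.len once == 0
  | a :: rest, once, twice =>
    if PySem.Set.contains twice a then false
    else if PySem.Set.contains once a then
      isFailGo rest (PySem.Set.discard once a) (PySem.Set.add twice a)
    else isFailGo rest (PySem.Set.add once a) twice

def is_fail_alt (i : List Int) : Bool := isFailGo i PySem.Set.empty PySem.Set.empty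

-- ===== PRECONDITION & SPEC =====
def Spec_is_fail (i : List Int) (out : Bool) : Prop := out = is_fail_alt i
instance (i : List Int) (out : Bool) : Decidable (Spec_is_fail i out) := by unfold Spec_is_fail; infer_instance

-- ===== CLAIM (what is proved, stated in full; the proofs are below) =====
def Claim_equal_is_fail : Prop := ∀ (i : List Int), Dom_is_fail i → Spec_is_fail i (is_fail i)

-- ===== LEMMAS AND PROOFS =====

-- A's counting loop is collections.Counter
lemma isfail_fold_eq_counter (i : List Int) :
    i.foldl (fun d a => if d.contains a then d.modify a 0 (· + 1) else d.insert a (1 : Int))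
      PySem.Dict.empty = PySem.Dict.counter i := by
  rw [PySem.Dict.counter_eq_foldl]
  congr 1
  funext d a
  by_cases h : d.contains a = true
  · simp [h]
  · have hf : d.contains a = false := by simpa using h
    have h0 : d.getD a 0 = 0 := PySem.Dict.getD_of_not_contains d 0 hf
    simp [h, PySem.Dict.modify, h0]

lemma isFailCheck_map (xs : List Int) (l : List Int) :
    isFailCheck (l.map (fun k => (k, (xs.count k : Int)))) =
      l.all (fun k => xs.count k == 2) := by
  induction l with
  | nil => rfl
  | cons k t ih =>
    simp only [List.map_cons, isFailCheck, List.all_cons, ih]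
    by_cases h : xs.count k = 2
    · have h' : (xs.count k : Int) = 2 := by exact_mod_cast h
      simp [h, h']
    · have h' : (xs.count k : Int) ≠ 2 := by exact_mod_cast h
      simp [h, h']

lemma is_fail_eq_decide (i : List Int) :
    is_fail i = decide (∀ a ∈ i, i.count a = 2) := by
  show isFailCheck _ = _
  rw [isfail_fold_eq_counter, PySem.Dict.items_counter, isFailCheck_map]
  by_cases h : ∀ a ∈ i, i.count a = 2
  · rw [decide_eq_true h, List.all_eq_true]
    intro k hk
    have := h k ((PySem.Set.mem_ofList _ _).1 hk)
    simp [this]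
  · rw [decide_eq_false h, List.all_eq_false]
    push Not at h
    obtain ⟨a, ha, hc⟩ := h
    refine ⟨a, (PySem.Set.mem_ofList _ _).2 ha, ?_⟩
    simp only [beq_iff_eq]
    exact_mod_cast fun h2 => hc (by exact_mod_cast h2)

-- B's loop invariant: once/twice hold exactly the elements seen once/twice so far
lemma isFailGo_eq (rest : List Int) :
    ∀ (pre : List Int) (once twice : PySem.Set Int),
      (∀ a : Int, a ∈ once ↔ pre.count a = 1) →
      (∀ a : Int, a ∈ twice ↔ pre.count a = 2) →
      (∀ a : Int, pre.count a ≤ 2) →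
      isFailGo rest once twice =
        decide (∀ a ∈ pre ++ rest, (pre ++ rest).count a = 2) := by
  induction rest with
  | nil =>
    intro pre once twice h1 h2 h3
    simp only [isFailGo, List.append_nil]
    by_cases h : ∀ a ∈ pre, pre.count a = 2
    · have honce : once = [] := by
        by_contra hne
        obtain ⟨a, ha⟩ := List.exists_mem_of_ne_nil once hne
        have hc1 := (h1 a).1 ha
        have : a ∈ pre := List.count_pos_iff.1 (by omega)
        have := h a this
        omega
      rw [honce, decide_eq_true h]
      simp [PySem.Set.len]
    · have honce : once ≠ [] := by
        push Not at h
        obtain ⟨a, ha, hc⟩ := h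
        have hpos : 0 < pre.count a := List.count_pos_iff.2 ha
        have hle := h3 a
        have : pre.count a = 1 := by
          rcases Nat.lt_or_ge (pre.count a) 2 with h' | h'
          · omega
          · omega
        intro hnil
        have := (h1 a).2 this
        simp [hnil] at this
      rw [decide_eq_false h]
      simp [PySem.Set.len, List.length_eq_zero_iff, honce]
  | cons a rest ih =>
    intro pre once twice h1 h2 h3
    simp only [isFailGo]
    by_cases ht : a ∈ twice
    · have htc : PySem.Set.contains twice a = true := (PySem.Set.contains_iff _ _).2 ht
      have hc : pre.count a = 2 := (h2 a).1 ht
      have hne : ¬ ∀ x ∈ pre ++ a :: rest, (pre ++ a :: rest).count x = 2 := by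
        intro hall
        have := hall a (by simp)
        rw [List.count_append, List.count_cons_self] at this
        omega
      rw [htc, decide_eq_false hne]
      simp
    · have htc : PySem.Set.contains twice a = false := by
        rcases hb : PySem.Set.contains twice a with _ | _
        · rfl
        · exact absurd ((PySem.Set.contains_iff _ _).1 hb) ht
      rw [htc]
      by_cases ho : a ∈ once
      · have hoc : PySem.Set.contains once a = true := (PySem.Set.contains_iff _ _).2 ho
        have hc : pre.count a = 1 := (h1 a).1 ho
        rw [if_neg (by simp), if_pos hoc]
        rw [ih (pre ++ [a]) _ _ ?h1 ?h2 ?h3]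
        · rw [List.append_assoc]; rfl
        case h1 =>
          intro x
          rw [PySem.Set.mem_discard, h1 x, List.count_append]
          by_cases hx : x = a
          · subst hx; simp [hc]
          · simp [List.count_singleton, hx, Ne.symm hx]
        case h2 =>
          intro x
          rw [PySem.Set.mem_add, h2 x, List.count_append]
          by_cases hx : x = a
          · subst hx; simp [hc]
          · simp [List.count_singleton, hx, Ne.symm hx]
        case h3 =>
          intro x
          rw [List.count_append]
          by_cases hx : x = a
          · subst hx; simp [hc, List.count_singleton]
          · have := h3 x
            simp [List.count_singleton, Ne.symm hx]; omega
      · have hc1 : pre.count a ≠ 1 := fun h => ho ((h1 a).2 h)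
        have hc2 : pre.count a ≠ 2 := fun h => ht ((h2 a).2 h)
        have hc : pre.count a = 0 := by have := h3 a; omega
        have hoc : PySem.Set.contains once a = false := by
          rcases hb : PySem.Set.contains once a with _ | _
          · rfl
          · exact absurd ((PySem.Set.contains_iff _ _).1 hb) ho
        rw [if_neg (by simp), hoc, if_neg (by simp)]
        rw [ih (pre ++ [a]) _ _ ?h1 ?h2 ?h3]
        · rw [List.append_assoc]; rfl
        case h1 =>
          intro x
          rw [PySem.Set.mem_add, h1 x, List.count_append]
          by_cases hx : x = a
          · subst hx; simp [hc]
          · simp [List.count_singleton, hx, Ne.symm hx]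
        case h2 =>
          intro x
          rw [h2 x, List.count_append]
          by_cases hx : x = a
          · subst hx; simp [hc]
          · simp [List.count_singleton, Ne.symm hx]
        case h3 =>
          intro x
          rw [List.count_append]
          by_cases hx : x = a
          · subst hx; simp [hc, List.count_singleton]
          · have := h3 x
            simp [List.count_singleton, Ne.symm hx]; omega

lemma is_fail_alt_eq_decide (i : List Int) :
    is_fail_alt i = decide (∀ a ∈ i, i.count a = 2) := by
  show isFailGo i [] [] = _
  rw [isFailGo_eq i [] [] [] (by simp) (by simp) (by simp)]
  rfl

-- ===== VERDICT (by name: the statement is the Claim_ definition above) =====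
theorem is_fail_spec : Claim_equal_is_fail := by
  intro i _
  show is_fail i = is_fail_alt i
  rw [is_fail_eq_decide, is_fail_alt_eq_decide]
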